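-- pv_equiv track=rewrite | github.com/techeer-sv/coteto | ryan/week1/medium.py | solution
-- ===== SOURCE A (Python) =====
-- def solution(clothes):
--     d = {}
--     for item, category in clothes:
--         if category not in d:
--             d[category] = 2
--         else:
--             d[category] += 1
--     answer = 1
--     for i in d.values():
--         answer *= i
--     return answer - 1
-- ===== SOURCE B (Python) =====
-- def solution(clothes):
--     s = sorted(clothes, key=lambda x: x[1])
--     prod = 1
--     i, n = 0, len(s)
--     while i < n:
--         cat = s[i][1]
--         j = i
--         while j < n and s[j][1] == cat:
--             j += 1
--         prod *= j - i + 1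
--         i = j
--     return prod - 1
-- ===== Notes on version B (the rewrite author's own statement) =====
-- stated objective: alternative
-- what changed: Replaces the hash-map tally of per-category counts with sorting a copy by category and one run-length scan over contiguous runs, multiplying (run length + 1) per run.
import Mathlib
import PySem

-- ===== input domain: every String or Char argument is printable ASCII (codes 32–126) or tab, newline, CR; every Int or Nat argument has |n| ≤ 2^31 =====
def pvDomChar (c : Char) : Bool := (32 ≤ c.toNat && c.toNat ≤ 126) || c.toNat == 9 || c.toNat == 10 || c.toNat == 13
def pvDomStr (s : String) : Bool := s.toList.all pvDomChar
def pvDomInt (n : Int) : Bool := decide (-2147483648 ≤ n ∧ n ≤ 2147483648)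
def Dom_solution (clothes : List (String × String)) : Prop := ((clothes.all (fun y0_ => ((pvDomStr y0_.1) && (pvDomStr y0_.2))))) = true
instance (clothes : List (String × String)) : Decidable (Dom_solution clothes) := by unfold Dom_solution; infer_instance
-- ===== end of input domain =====

-- B replaces A's hash-map tally with sort-by-category + run-length scan (alternative algorithm, same results).


-- ===== PORT A =====
def solution (clothes : List (String × String)) : Int :=
  let d : PySem.Dict String Int := clothes.foldl (fun d q =>
    if d.contains q.2 = false then d.insert q.2 2
    else d.insert q.2 (d.getD q.2 0 + 1)) PySem.Dict.empty
  let answer : Int := d.values.foldl (fun answer i => answer * i) 1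
  answer - 1

-- ===== PORT B =====
-- run-length scan over the category-sorted list: each run of equal categories
-- contributes a factor (run length + 1)
def solRuns : List (String × String) → Int
  | [] => 1
  | p :: rest =>
      ((rest.takeWhile (fun q => q.2 == p.2)).length + 2 : Int)
        * solRuns (rest.dropWhile (fun q => q.2 == p.2))
  termination_by l => l.length
  decreasing_by
    have := List.length_dropWhile_le (p := fun q => q.2 == p.2) (l := rest)
    simp only [List.length_cons]; omega

def solution_alt (clothes : List (String × String)) : Int :=
  solRuns (PySem.List.sorted clothes (fun x => x.2) false) - 1

-- ===== PRECONDITION & SPEC =====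
def Spec_solution (clothes : List (String × String)) (out : Int) : Prop := out = solution_alt clothes
instance (clothes : List (String × String)) (out : Int) : Decidable (Spec_solution clothes out) := by unfold Spec_solution; infer_instance

-- ===== CLAIM (what is proved, stated in full; the proofs are below) =====
def Claim_equal_solution : Prop := ∀ (clothes : List (String × String)), Dom_solution clothes → Spec_solution clothes (solution clothes)

-- ===== LEMMAS AND PROOFS =====

-- A's loop body is the single-insert step with default 1
lemma stepA_eq (d : PySem.Dict String Int) (q : String × String) :
    (if d.contains q.2 = false then d.insert q.2 2
     else d.insert q.2 (d.getD q.2 0 + 1))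
    = d.insert q.2 (d.getD q.2 1 + 1) := by
  cases h : d.get? q.2 with
  | none =>
      have hc : d.contains q.2 = false := by
        rw [PySem.Dict.contains_eq_isSome_get?, h]; rfl
      simp [hc, PySem.Dict.getD_eq_get?_getD, h]
  | some v =>
      have hc : d.contains q.2 = true := by
        rw [PySem.Dict.contains_eq_isSome_get?, h]; rfl
      simp [hc, PySem.Dict.getD_eq_get?_getD, h]

lemma foldA_getD (l : List (String × String)) (d : PySem.Dict String Int) (c : String) :
    (l.foldl (fun d q => d.insert q.2 (d.getD q.2 1 + 1)) d).getD c 1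
      = d.getD c 1 + ((l.map (fun p => p.2)).count c : Int) := by
  induction l generalizing d with
  | nil => simp
  | cons p l ih =>
      simp only [List.foldl_cons, ih, List.map_cons]
      rw [PySem.Dict.getD_insert]
      by_cases hc : c = p.2
      · subst hc; simp; ring
      · simp [hc, Ne.symm hc]

-- the product of A's dict values, as a map-product over the deduped categories
lemma valuesA (clothes : List (String × String)) :
    (clothes.foldl (fun d q =>
        if d.contains q.2 = false then d.insert q.2 2
        else d.insert q.2 (d.getD q.2 0 + 1)) (PySem.Dict.empty : PySem.Dict String Int)).values
    = (PySem.Set.ofList (clothes.map (fun p => p.2))).map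
        (fun c => 1 + ((clothes.map (fun p => p.2)).count c : Int)) := by
  have hfun : (fun (d : PySem.Dict String Int) (q : String × String) =>
      if d.contains q.2 = false then d.insert q.2 2
      else d.insert q.2 (d.getD q.2 0 + 1))
      = fun d q => d.insert q.2 (d.getD q.2 1 + 1) := by
    funext d q; exact stepA_eq d q
  rw [hfun]
  have hnd : (clothes.foldl (fun d q => d.insert q.2 (d.getD q.2 1 + 1))
      (PySem.Dict.empty : PySem.Dict String Int)).keys.Nodup :=
    PySem.Dict.nodup_keys_foldl_insert_key _ _ _ _ (by simp)
  rw [PySem.Dict.values_eq_map_keys _ hnd 1]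
  rw [PySem.Dict.keys_foldl_insert_key]
  have hk : PySem.Set.update (PySem.Dict.empty : PySem.Dict String Int).keys
      (clothes.map (fun p => p.2)) = PySem.Set.ofList (clothes.map (fun p => p.2)) := rfl
  rw [hk]
  apply List.map_congr_left
  intro c _
  rw [foldA_getD]
  simp

-- sets built from lists with the same elements give equal map-products
lemma prod_map_ofList_congr (xs ys : List String) (f : String → Int)
    (h : xs.Perm ys) :
    ((PySem.Set.ofList xs).map f).prod = ((PySem.Set.ofList ys).map f).prod := by
  have hperm : (PySem.Set.ofList xs).Perm (PySem.Set.ofList ys) := by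
    rw [List.perm_ext_iff_of_nodup (PySem.Set.nodup_ofList xs) (PySem.Set.nodup_ofList ys)]
    intro a
    rw [PySem.Set.mem_ofList, PySem.Set.mem_ofList]
    exact ⟨fun hx => h.mem_iff.mp hx, fun hy => h.mem_iff.mpr hy⟩
  exact (hperm.map f).prod_eq

-- building ofList over a run of one repeated value followed by a tail avoiding it
lemma foldl_add_cons_of_not_mem (c : String) :
    ∀ (t : List String) (s : List String), c ∉ t →
      List.foldl PySem.Set.add (c :: s) t = c :: List.foldl PySem.Set.add s t := by
  intro t
  induction t with
  | nil => intro s _; rfl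
  | cons x t ih =>
      intro s hx
      have hxc : x ≠ c := fun h => hx (by simp [h])
      have hxt : c ∉ t := fun h => hx (by simp [h])
      simp only [List.foldl_cons]
      have hadd : PySem.Set.add (c :: s) x = c :: PySem.Set.add s x := by
        simp only [PySem.Set.add, PySem.Set.contains]
        by_cases hm : x ∈ s
        · simp [hm, hxc]
        · simp [hm, hxc]
      rw [hadd, ih _ hxt]

lemma ofList_run (c : String) (g t : List String)
    (hg : ∀ x ∈ g, x = c) (hc : c ∉ t) :
    PySem.Set.ofList (c :: (g ++ t)) = c :: PySem.Set.ofList t := by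
  rw [PySem.Set.ofList_eq_foldl]
  simp only [List.foldl_cons, List.foldl_append]
  have h1 : PySem.Set.add ([] : List String) c = [c] := rfl
  rw [h1]
  have h2 : List.foldl PySem.Set.add [c] g = [c] := by
    induction g with
    | nil => rfl
    | cons x g ihg =>
        have hx : x = c := hg x (by simp)
        have : PySem.Set.add [c] x = [c] := by
          simp [PySem.Set.add, PySem.Set.contains, hx]
        simp only [List.foldl_cons, this]
        exact ihg (fun y hy => hg y (by simp [hy]))
  rw [h2, foldl_add_cons_of_not_mem c t [] hc, PySem.Set.ofList_eq_foldl]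

-- the run-length scan computes the per-category (count+1) product on a key-sorted list
lemma solRuns_eq (s : List (String × String))
    (hs : (s.map (fun p => p.2)).Pairwise (· ≤ ·)) :
    solRuns s = ((PySem.Set.ofList (s.map (fun p => p.2))).map
        (fun c => 1 + ((s.map (fun p => p.2)).count c : Int))).prod := by
  match s with
  | [] => simp [solRuns]
  | p :: rest =>
    set c := p.2 with hc
    set g := rest.takeWhile (fun q => q.2 == c) with hgdef
    set t := rest.dropWhile (fun q => q.2 == c) with htdef
    have hrest : rest = g ++ t := (List.takeWhile_append_dropWhile).symm
    have hgall : ∀ q ∈ g, q.2 = c := by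
      intro q hq
      have := List.mem_takeWhile_imp (hgdef ▸ hq)
      simpa using this
    -- c does not occur among t's categories
    have hct : c ∉ t.map (fun p => p.2) := by
      cases ht : t with
      | nil => simp
      | cons d t' =>
          have hd : ¬ (d.2 == c) = true := by
            have := List.head?_dropWhile_not (p := fun q => q.2 == c) (l := rest)
            rw [← htdef, ht] at this
            simpa using this
          have hdc : d.2 ≠ c := by simpa using hd
          -- pairwise on the whole category list
          have hpw := hs
          rw [List.map_cons, List.pairwise_cons] at hpw
          have hcle : ∀ x ∈ rest.map (fun p => p.2), c ≤ x := hpw.1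
          have hcled : c ≤ d.2 := hcle d.2 (by
            rw [hrest, ht]; simp)
          have hlt : c < d.2 := lt_of_le_of_ne hcled (Ne.symm hdc)
          -- pairwise within t's categories
          have hpt : (t.map (fun p => p.2)).Pairwise (· ≤ ·) := by
            have : (rest.map (fun p => p.2)).Pairwise (· ≤ ·) := hpw.2
            rw [hrest, List.map_append] at this
            exact (List.pairwise_append.mp this).2.1
          rw [ht, List.map_cons, List.pairwise_cons] at hpt
          intro hmem
          simp only [List.map_cons, List.mem_cons] at hmem
          rcases hmem with h | h
          · exact hdc h.symm
          · have : d.2 ≤ c := by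
              rcases List.mem_map.mp h with ⟨q, hq, hqc⟩
              exact hqc ▸ hpt.1 q.2 (List.mem_map.mpr ⟨q, hq, rfl⟩)
            exact absurd (lt_of_lt_of_le hlt this) (lt_irrefl c)
    have hpt : (t.map (fun p => p.2)).Pairwise (· ≤ ·) := by
      have hpw := hs
      rw [List.map_cons, List.pairwise_cons] at hpw
      have : (rest.map (fun p => p.2)).Pairwise (· ≤ ·) := hpw.2
      rw [hrest, List.map_append] at this
      exact (List.pairwise_append.mp this).2.1
    have hlen : t.length < (p :: rest).length := by
      have := List.length_dropWhile_le (p := fun q => q.2 == c) (l := rest)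
      rw [← htdef] at this
      simp; omega
    have iht := solRuns_eq t hpt
    -- decompose the category list of p :: rest
    have hcats : (p :: rest).map (fun p => p.2)
        = c :: ((g.map (fun p => p.2)) ++ t.map (fun p => p.2)) := by
      rw [List.map_cons, hrest, List.map_append]
    have hgcats : ∀ x ∈ g.map (fun p => p.2), x = c := by
      intro x hx
      rcases List.mem_map.mp hx with ⟨q, hq, hqx⟩
      exact hqx ▸ hgall q hq
    have hofl : PySem.Set.ofList ((p :: rest).map (fun p => p.2))
        = c :: PySem.Set.ofList (t.map (fun p => p.2)) := by
      rw [hcats]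
      exact ofList_run c _ _ hgcats hct
    -- counts
    have hcount_c : ((p :: rest).map (fun p => p.2)).count c = g.length + 1 := by
      have h0 : (c :: ((g.map (fun p => p.2)) ++ t.map (fun p => p.2))).count c
          = ((g.map (fun p => p.2)).count c + (t.map (fun p => p.2)).count c) + 1 := by
        simp [List.count_append]
      rw [hcats, h0]
      have h1 : (g.map (fun p => p.2)).count c = g.length := by
        rw [List.count_eq_length.mpr (fun x hx => (hgcats x hx).symm ▸ rfl)]
        simp
      have h2 : (t.map (fun p => p.2)).count c = 0 :=
        List.count_eq_zero.mpr hct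
      rw [h1, h2]
    have hcount_ne : ∀ c', c' ≠ c →
        ((p :: rest).map (fun p => p.2)).count c' = (t.map (fun p => p.2)).count c' := by
      intro c' hne
      rw [hcats]
      simp only [List.count_cons, List.count_append, beq_iff_eq]
      have : (g.map (fun p => p.2)).count c' = 0 := by
        rw [List.count_eq_zero]
        intro hmem
        exact hne (hgcats c' hmem)
      rw [this]
      simp [Ne.symm hne]
    -- put it together
    rw [solRuns, hofl, List.map_cons, List.prod_cons, iht]
    have hfac : 1 + (((p :: rest).map (fun p => p.2)).count c : Int)
        = (g.length : Int) + 2 := by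
      rw [hcount_c]; push_cast; ring
    rw [hfac]
    congr 1
    apply congrArg List.prod
    apply List.map_congr_left
    intro c' hmem
    have hne : c' ≠ c := by
      intro h
      subst h
      exact hct ((PySem.Set.mem_ofList _ _).mp hmem)
    rw [hcount_ne c' hne]
  termination_by s.length
  decreasing_by simpa using hlen

-- ===== VERDICT (by name: the statement is the Claim_ definition above) =====
theorem solution_spec : Claim_equal_solution := by
  intro clothes _
  unfold Spec_solution solution solution_alt
  simp only []
  rw [valuesA]
  have hperm : (PySem.List.sorted clothes (fun x => x.2) false).Perm clothes :=
    PySem.List.sorted_perm clothes (fun x => x.2) false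
  have hcperm : ((PySem.List.sorted clothes (fun x => x.2) false).map (fun p => p.2)).Perm
      (clothes.map (fun p => p.2)) := hperm.map _
  rw [solRuns_eq _ (PySem.List.sorted_map_key_pairwise clothes (fun x => x.2))]
  have hfoldl : ∀ l : List Int, l.foldl (fun answer i => answer * i) 1 = l.prod := by
    intro l; rw [List.prod_eq_foldl]
  rw [hfoldl]
  congr 1
  have hfun : (fun c => 1 + (((PySem.List.sorted clothes (fun x => x.2) false).map
        (fun p => p.2)).count c : Int))
      = fun c => 1 + ((clothes.map (fun p => p.2)).count c : Int) :=
    funext fun c => by rw [hcperm.count_eq]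
  rw [hfun]
  exact prod_map_ofList_congr _ _ _ hcperm.symm
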